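-- pv_equiv track=rewrite | github.com/DKLynch/CodeSignal-Tasks | The Core/Loop Tunnel/32. Rounders/rounders.py | rounders
-- ===== SOURCE A (Python) =====
-- def rounders(n):
--     num = str(n)
--     chars = list(num)
--     carry = False
--     result = ""
--
--     for x in range(len(chars) - 1, -1, -1):
--         c = int(str(chars[x]))
--
--         if(carry):
--             c += 1
--
--         carry = False
--
--         if(c >= 5):
--             carry = True
--
--         if(x != 0):
--             result += "0"
--         else:
--             if(c == 10):
--                 result += "01"
--             else:
--                 result += str(c);
--
--     return int(result[::-1])
-- ===== SOURCE B (Python) =====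
-- def rounders(n):
--     s = str(n)
--     res = n
--     place = 1
--     for _ in range(len(s) - 1):
--         place *= 10
--         rem = res % place
--         res = res - rem
--         if 2 * rem >= place:
--             res = res + place
--     return res
-- ===== Notes on version B (the rewrite author's own statement) =====
-- stated objective: simpler
-- what changed: B replaces A's per-character string machinery (listing the digit characters, re-parsing each with int(), building a reversed result string digit by digit and parsing it back) with pure integer arithmetic: it keeps the running value and rounds it half-up at successive place values with % and comparison, using the string only for the digit count; Pre_ excludes negative n, on which A raises ValueError.
import Mathlib
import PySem

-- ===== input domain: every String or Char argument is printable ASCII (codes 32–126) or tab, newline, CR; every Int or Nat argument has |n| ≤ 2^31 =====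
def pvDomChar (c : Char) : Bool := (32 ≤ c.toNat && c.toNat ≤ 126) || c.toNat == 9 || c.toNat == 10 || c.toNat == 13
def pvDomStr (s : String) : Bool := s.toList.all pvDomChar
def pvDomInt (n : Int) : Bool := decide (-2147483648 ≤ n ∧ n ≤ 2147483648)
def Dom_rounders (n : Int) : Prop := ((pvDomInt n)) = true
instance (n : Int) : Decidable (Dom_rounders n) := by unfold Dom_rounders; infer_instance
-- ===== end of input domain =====

-- B rounds the integer digit by digit with place-value arithmetic instead of A's
-- string building and re-parsing; equivalence is about the RETURN value on n ≥ 0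
-- (A raises ValueError on negative n, excluded by Pre_).

-- ===== PORT A =====
-- Python strings are ported as List Char (result += "0" is ++ ['0']); result[::-1]
-- is List.reverse (exact: PySem.List.slice?_none_none_neg_one); int(str(chars[x]))
-- is ofChars? of the one-character list; out-of-range/parse failures (unreachable
-- for n ≥ 0) fall to the .getD defaults, Python raises there.
def rounders (n : Int) : Int :=
  let num : String := PySem.Int.toStr n
  let chars : List Char := num.toList
  let st :=
    (PySem.List.pyRange (PySem.List.len chars - 1) (-1) (-1)).foldl
      (fun (st : List Char × Bool) (x : Int) =>
        let result := st.1
        let carry := st.2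
        let ch : Char := (PySem.List.pyGet? chars x).getD ' '
        let c : Int := (PySem.Int.ofChars? [ch]).getD 0
        let c : Int := if carry then c + 1 else c
        let carry : Bool := false
        let carry : Bool := if 5 ≤ c then true else carry
        let result : List Char :=
          if x ≠ 0 then result ++ ['0']
          else if c == 10 then result ++ ['0', '1']
          else result ++ PySem.Int.toChars c
        (result, carry))
      ([], false)
  (PySem.Int.ofChars? st.1.reverse).getD 0

-- ===== PORT B =====
def rounders_alt (n : Int) : Int :=
  let s : String := PySem.Int.toStr n
  let st :=
    (PySem.List.pyRange 0 (PySem.Str.len s - 1) 1).foldl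
      (fun (st : Int × Int) (_ : Int) =>
        let place := st.2 * 10
        let rem := PySem.Int.mod st.1 place
        let res := st.1 - rem
        let res := if 2 * rem ≥ place then res + place else res
        (res, place))
      (n, 1)
  st.1

-- ===== PRECONDITION & SPEC =====
-- Pre_ excludes negative n: str(n) then starts with '-' and A's int() on that
-- character raises ValueError (A returns on every n ≥ 0).
def Pre_rounders (n : Int) : Prop := 0 ≤ n
instance (n : Int) : Decidable (Pre_rounders n) := by unfold Pre_rounders; infer_instance
def pvWitness_rounders : Int := (45)
def Spec_rounders (n : Int) (out : Int) : Prop := out = rounders_alt n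
instance (n : Int) (out : Int) : Decidable (Spec_rounders n out) := by unfold Spec_rounders; infer_instance

-- ===== CLAIM (what is proved, stated in full; the proofs are below) =====
def Claim_equal_rounders : Prop := ∀ (n : Int), Dom_rounders n → Pre_rounders n → Spec_rounders n (rounders n)

-- ===== LEMMAS AND PROOFS =====

-- carry produced by half-up rounding of the k least significant digits of m
def pvCar (m : ℕ) : ℕ → ℕ
  | 0 => 0
  | k + 1 => if 5 ≤ m / 10 ^ k % 10 + pvCar m k then 1 else 0

theorem pvCar_le_one (m k : ℕ) : pvCar m k ≤ 1 := by
  cases k with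
  | zero => simp [pvCar]
  | succ k => simp only [pvCar]; split <;> omega

-- `str(n)` for n > 0 lists the base-10 digits, most significant first
theorem toDigits_eq_digits (m : ℕ) (hm : m ≠ 0) :
    Nat.toDigits 10 m = ((Nat.digits 10 m).map Nat.digitChar).reverse := by
  induction m using Nat.strong_induction_on with
  | _ m ih =>
    rw [Nat.toDigits_eq_if (by norm_num)]
    by_cases h : m < 10
    · rw [if_pos h, Nat.digits_def' (by norm_num) (Nat.pos_of_ne_zero hm)]
      rw [Nat.mod_eq_of_lt h, Nat.div_eq_of_lt h]
      simp
    · rw [if_neg h, Nat.digits_def' (by norm_num) (Nat.pos_of_ne_zero hm)]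
      rw [ih (m / 10) (by omega) (by omega)]
      simp

-- the loop bodies of the two ports, named for the proofs
def pvStepA (chars : List Char) (st : List Char × Bool) (x : Int) : List Char × Bool :=
  let result := st.1
  let carry := st.2
  let ch : Char := (PySem.List.pyGet? chars x).getD ' '
  let c : Int := (PySem.Int.ofChars? [ch]).getD 0
  let c : Int := if carry then c + 1 else c
  let carry : Bool := false
  let carry : Bool := if 5 ≤ c then true else carry
  let result : List Char :=
    if x ≠ 0 then result ++ ['0']
    else if c == 10 then result ++ ['0', '1']
    else result ++ PySem.Int.toChars c
  (result, carry)

def pvStepB (st : Int × Int) (_x : Int) : Int × Int :=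
  let place := st.2 * 10
  let rem := PySem.Int.mod st.1 place
  let res := st.1 - rem
  let res := if 2 * rem ≥ place then res + place else res
  (res, place)

theorem rounders_eq (n : Int) :
    rounders n =
      (PySem.Int.ofChars?
        (((PySem.List.pyRange (PySem.List.len (PySem.Int.toStr n).toList - 1) (-1) (-1)).foldl
            (pvStepA (PySem.Int.toStr n).toList) ([], false)).1.reverse)).getD 0 := rfl

theorem rounders_alt_eq (n : Int) :
    rounders_alt n =
      ((PySem.List.pyRange 0 (PySem.Str.len (PySem.Int.toStr n) - 1) 1).foldl
          pvStepB (n, 1)).1 := rfl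

theorem ofChars?_digit (d : ℕ) (hd : d < 10) :
    PySem.Int.ofChars? [Nat.digitChar d] = some (d : ℤ) := by
  interval_cases d <;> decide

theorem ofChars?_digit_zeros (v k : ℕ) (hv : v < 10) (hk : k ≤ 9) :
    PySem.Int.ofChars? (Nat.digitChar v :: List.replicate k '0') = some ((v * 10 ^ k : ℕ) : ℤ) := by
  interval_cases v <;> interval_cases k <;> decide

theorem ofChars?_ten_zeros (k : ℕ) (hk : k ≤ 9) :
    PySem.Int.ofChars? ('1' :: '0' :: List.replicate k '0') = some ((10 ^ (k + 1) : ℕ) : ℤ) := by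
  interval_cases k <;> decide

-- `str(m)` seen as the digit character at each index, counted from the right
theorem read_digit (m j : ℕ) (hj : j < (Nat.digits 10 m).length) :
    (PySem.List.pyGet? ((Nat.digits 10 m).map Nat.digitChar).reverse
        (((Nat.digits 10 m).length : ℤ) - 1 - (j : ℤ))).getD ' '
      = Nat.digitChar (m / 10 ^ j % 10) := by
  have hlen : ((Nat.digits 10 m).map Nat.digitChar).length = (Nat.digits 10 m).length :=
    List.length_map ..
  have hidx : (((Nat.digits 10 m).length : ℤ) - 1 - (j : ℤ))
      = (((Nat.digits 10 m).length - 1 - j : ℕ) : ℤ) := by omega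
  rw [hidx, PySem.List.pyGet?_natCast,
    List.getElem?_reverse (by rw [hlen]; omega), hlen]
  have harith : (Nat.digits 10 m).length - 1 - ((Nat.digits 10 m).length - 1 - j) = j := by
    omega
  have hgd : (Nat.digits 10 m)[j] = m / 10 ^ j % 10 := by
    rw [← List.getD_eq_getElem (Nat.digits 10 m) 0 hj, Nat.getD_digits m j (by norm_num)]
  rw [harith, List.getElem?_map, List.getElem?_eq_getElem hj, hgd]
  rfl

-- the invariant of A's loop over the first k (least significant, all non-leading) digits
theorem loopA (m k : ℕ) (hm : m ≠ 0) (hk : k ≤ (Nat.digits 10 m).length - 1) :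
    ((List.range k).map (fun j : ℕ => ((Nat.digits 10 m).length : ℤ) - 1 - (j : ℤ))).foldl
        (pvStepA ((Nat.digits 10 m).map Nat.digitChar).reverse) ([], false)
      = (List.replicate k '0', decide (pvCar m k = 1)) := by
  have hL1 : 1 ≤ (Nat.digits 10 m).length :=
    List.length_pos_iff.mpr (Nat.digits_ne_nil_iff_ne_zero.mpr hm)
  induction k with
  | zero => simp [pvCar]
  | succ k ih =>
    have hk' : k ≤ (Nat.digits 10 m).length - 1 := by omega
    rw [List.range_succ, List.map_append, List.foldl_append, ih hk']
    simp only [List.map_cons, List.map_nil, List.foldl_cons, List.foldl_nil]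
    have he : m / 10 ^ k % 10 < 10 := Nat.mod_lt _ (by norm_num)
    have hcar := pvCar_le_one m k
    simp only [pvStepA]
    rw [read_digit m k (by omega), ofChars?_digit (m / 10 ^ k % 10) he]
    have hx : ((((Nat.digits 10 m).length : ℤ) - 1 - (k : ℤ)) ≠ 0) := by omega
    rw [if_pos hx, ← List.replicate_succ']
    simp only [Option.getD_some]
    have hc : (if decide (pvCar m k = 1) = true then ((m / 10 ^ k % 10 : ℕ) : ℤ) + 1
        else ((m / 10 ^ k % 10 : ℕ) : ℤ)) = ((m / 10 ^ k % 10 + pvCar m k : ℕ) : ℤ) := by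
      rcases Nat.le_one_iff_eq_zero_or_eq_one.mp hcar with h | h <;> rw [h] <;> simp
    rw [hc]
    have hcarry : (if (5 : ℤ) ≤ ((m / 10 ^ k % 10 + pvCar m k : ℕ) : ℤ) then true else false)
        = decide (pvCar m (k + 1) = 1) := by
      by_cases h5 : 5 ≤ m / 10 ^ k % 10 + pvCar m k
      · rw [if_pos (by exact_mod_cast h5)]; simp [pvCar, h5]
      · rw [if_neg (by exact_mod_cast h5)]; simp [pvCar, h5]
    rw [hcarry]

-- the invariant of B's loop: after k roundings the value is the rounded prefix times 10^k
theorem loopB (m k : ℕ) :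
    ((List.range k).map (fun j : ℕ => (0 : ℤ) + (j : ℤ))).foldl pvStepB ((m : ℤ), 1)
      = ((10 : ℤ) ^ k * (((m / 10 ^ k : ℕ) : ℤ) + ((pvCar m k : ℕ) : ℤ)), (10 : ℤ) ^ k) := by
  induction k with
  | zero => simp [pvCar]
  | succ k ih =>
    rw [List.range_succ, List.map_append, List.foldl_append, ih]
    simp only [List.map_cons, List.map_nil, List.foldl_cons, List.foldl_nil]
    simp only [pvStepB]
    set P : ℤ := (10 : ℤ) ^ k with hP
    have hPpos : 0 < P := by positivity
    set Dn : ℕ := m / 10 ^ k + pvCar m k with hDn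
    have hD : ((m / 10 ^ k : ℕ) : ℤ) + ((pvCar m k : ℕ) : ℤ) = (Dn : ℤ) := by rw [hDn]; push_cast; ring
    have hmod : PySem.Int.mod (P * (Dn : ℤ)) (P * 10) = P * (((Dn % 10 : ℕ) : ℤ)) := by
      rw [PySem.Int.mod_eq_emod_of_pos (by positivity), Int.mul_emod_mul_of_pos _ _ hPpos]
      push_cast; ring
    have hcond : ((P * 10 ≤ 2 * (P * ((Dn % 10 : ℕ) : ℤ)))) ↔ ((10 : ℤ) ≤ 2 * ((Dn % 10 : ℕ) : ℤ)) := by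
      constructor
      · intro h; nlinarith
      · intro h; nlinarith
    have he : m / 10 ^ k % 10 < 10 := Nat.mod_lt _ (by norm_num)
    have hcar := pvCar_le_one m k
    have hq : m / 10 ^ k = 10 * (m / 10 ^ (k + 1)) + m / 10 ^ k % 10 := by
      rw [pow_succ, ← Nat.div_div_eq_div_mul]
      omega
    have hcar' : pvCar m (k + 1) = if 5 ≤ m / 10 ^ k % 10 + pvCar m k then 1 else 0 := by
      simp [pvCar]
    simp only [hD, hmod, ge_iff_le, Prod.mk.injEq]
    refine ⟨?_, by rw [pow_succ]⟩
    rw [pow_succ]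
    by_cases hcd : (10 : ℤ) ≤ 2 * ((Dn % 10 : ℕ) : ℤ)
    · rw [if_pos (hcond.mpr hcd)]
      have hcdN : 10 ≤ 2 * (Dn % 10) := by exact_mod_cast hcd
      have key : ((Dn : ℕ) : ℤ) - ((Dn % 10 : ℕ) : ℤ) + 10
          = 10 * (((m / 10 ^ (k + 1) : ℕ) : ℤ) + ((pvCar m (k + 1) : ℕ) : ℤ)) := by
        rw [hcar']
        split_ifs with h5 <;> omega
      linear_combination P * key
    · rw [if_neg (fun h => hcd (hcond.mp h))]
      have hcdN : ¬ 10 ≤ 2 * (Dn % 10) := by exact_mod_cast hcd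
      have key : ((Dn : ℕ) : ℤ) - ((Dn % 10 : ℕ) : ℤ)
          = 10 * (((m / 10 ^ (k + 1) : ℕ) : ℤ) + ((pvCar m (k + 1) : ℕ) : ℤ)) := by
        rw [hcar']
        split_ifs with h5 <;> omega
      linear_combination P * key

theorem toChars_natCast (m : ℕ) (hm : m ≠ 0) :
    PySem.Int.toChars (m : ℤ) = ((Nat.digits 10 m).map Nat.digitChar).reverse := by
  rw [PySem.Int.toChars.eq_1]
  rw [if_neg (by omega)]
  rw [Int.toNat_natCast, toDigits_eq_digits m hm]

theorem A_val (m : ℕ) (hm : m ≠ 0) (hL10 : (Nat.digits 10 m).length ≤ 10) :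
    rounders (m : ℤ)
      = (((m / 10 ^ ((Nat.digits 10 m).length - 1) % 10
            + pvCar m ((Nat.digits 10 m).length - 1)) * 10 ^ ((Nat.digits 10 m).length - 1) : ℕ) : ℤ) := by
  have hL1 : 1 ≤ (Nat.digits 10 m).length :=
    List.length_pos_iff.mpr (Nat.digits_ne_nil_iff_ne_zero.mpr hm)
  set l := (Nat.digits 10 m).length - 1 with hl
  have hLl : (Nat.digits 10 m).length = l + 1 := by omega
  have hl9 : l ≤ 9 := by omega
  have hchars : (PySem.Int.toStr (m : ℤ)).toList = ((Nat.digits 10 m).map Nat.digitChar).reverse := by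
    rw [PySem.Int.toList_toStr, toChars_natCast m hm]
  rw [rounders_eq, hchars, PySem.List.len_eq]
  simp only [List.length_reverse, List.length_map]
  rw [PySem.List.pyRange_neg_one]
  have hcnt : (((Nat.digits 10 m).length : ℤ) - 1 - (-1)).toNat = (Nat.digits 10 m).length := by
    omega
  rw [hcnt]
  have hrange : List.range (Nat.digits 10 m).length = List.range l ++ [l] := by
    rw [hLl, List.range_succ]
  rw [hrange, List.map_append, List.foldl_append, loopA m l hm (by omega)]
  simp only [List.map_cons, List.map_nil, List.foldl_cons, List.foldl_nil]
  have he : m / 10 ^ l % 10 < 10 := Nat.mod_lt _ (by norm_num)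
  have hcar := pvCar_le_one m l
  simp only [pvStepA]
  rw [read_digit m l (by omega), ofChars?_digit (m / 10 ^ l % 10) he]
  simp only [Option.getD_some]
  have hc : (if decide (pvCar m l = 1) = true then ((m / 10 ^ l % 10 : ℕ) : ℤ) + 1
      else ((m / 10 ^ l % 10 : ℕ) : ℤ)) = ((m / 10 ^ l % 10 + pvCar m l : ℕ) : ℤ) := by
    rcases Nat.le_one_iff_eq_zero_or_eq_one.mp hcar with h | h <;> rw [h] <;> simp
  rw [hc]
  rw [if_neg (show ¬((((Nat.digits 10 m).length : ℤ) - 1 - (l : ℤ)) ≠ 0) by omega)]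
  by_cases h10 : m / 10 ^ l % 10 + pvCar m l = 10
  · rw [if_pos (show ((((m / 10 ^ l % 10 + pvCar m l : ℕ) : ℤ)) == 10) = true by simp [h10])]
    have hrev : (List.replicate l '0' ++ ['0', '1']).reverse = '1' :: '0' :: List.replicate l '0' := by
      simp
    rw [hrev, ofChars?_ten_zeros l hl9, Option.getD_some]
    have : (m / 10 ^ l % 10 + pvCar m l) * 10 ^ l = 10 ^ (l + 1) := by
      rw [h10, pow_succ]; ring
    rw [this]
  · rw [if_neg (show ¬((((m / 10 ^ l % 10 + pvCar m l : ℕ) : ℤ)) == 10) = true by simp only [beq_iff_eq]; exact_mod_cast h10)]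
    have hlt10 : m / 10 ^ l % 10 + pvCar m l < 10 := by omega
    have htc : PySem.Int.toChars ((m / 10 ^ l % 10 + pvCar m l : ℕ) : ℤ)
        = [Nat.digitChar (m / 10 ^ l % 10 + pvCar m l)] := by
      rw [PySem.Int.toChars.eq_1, if_neg (by omega), Int.toNat_natCast,
        Nat.toDigits_of_lt_base hlt10]
    rw [htc]
    have hrev : (List.replicate l '0' ++ [Nat.digitChar (m / 10 ^ l % 10 + pvCar m l)]).reverse
        = Nat.digitChar (m / 10 ^ l % 10 + pvCar m l) :: List.replicate l '0' := by
      simp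
    rw [hrev, ofChars?_digit_zeros _ l hlt10 hl9, Option.getD_some]

theorem B_val (m : ℕ) (hm : m ≠ 0) :
    rounders_alt (m : ℤ)
      = (10 : ℤ) ^ ((Nat.digits 10 m).length - 1)
          * (((m / 10 ^ ((Nat.digits 10 m).length - 1) : ℕ) : ℤ)
             + ((pvCar m ((Nat.digits 10 m).length - 1) : ℕ) : ℤ)) := by
  have hchars : (PySem.Int.toStr (m : ℤ)).toList = ((Nat.digits 10 m).map Nat.digitChar).reverse := by
    rw [PySem.Int.toList_toStr, toChars_natCast m hm]
  rw [rounders_alt_eq, PySem.Str.len_eq, hchars]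
  simp only [List.length_reverse, List.length_map]
  rw [PySem.List.pyRange_one]
  have hcnt : (((Nat.digits 10 m).length : ℤ) - 1 - 0).toNat = (Nat.digits 10 m).length - 1 := by
    omega
  rw [hcnt, loopB m ((Nat.digits 10 m).length - 1)]

theorem rounders_spec_pos (m : ℕ) (hm : m ≠ 0) (hle : m ≤ 2147483648) :
    rounders (m : ℤ) = rounders_alt (m : ℤ) := by
  have hL10 : (Nat.digits 10 m).length ≤ 10 :=
    (Nat.digits_length_le_iff (by norm_num) m).mpr (by omega)
  rw [A_val m hm hL10, B_val m hm]
  set l := (Nat.digits 10 m).length - 1 with hl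
  have htop : m / 10 ^ l < 10 := by
    have hmlt : m < 10 ^ (Nat.digits 10 m).length := Nat.lt_base_pow_length_digits (by norm_num)
    have hL1 : 1 ≤ (Nat.digits 10 m).length :=
      List.length_pos_iff.mpr (Nat.digits_ne_nil_iff_ne_zero.mpr hm)
    have : (Nat.digits 10 m).length = l + 1 := by omega
    rw [this, pow_succ] at hmlt
    exact Nat.div_lt_of_lt_mul hmlt
  rw [Nat.mod_eq_of_lt htop]
  push_cast
  ring

-- ===== VERDICT (by name: the statement is the Claim_ definition above) =====
theorem rounders_spec : Claim_equal_rounders := by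
  intro n hdom hpre
  unfold Spec_rounders
  rcases Int.eq_ofNat_of_zero_le hpre with ⟨m, rfl⟩
  by_cases hm : m = 0
  · subst hm; decide
  · exact rounders_spec_pos m hm (by
      simp [Dom_rounders, pvDomInt] at hdom
      omega)
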